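-- pv_equiv track=rewrite | github.com/Akshat-A-K/Graph-based-QA | parser/answer_selector.py | _fuzzy_overlap
-- ===== SOURCE A (Python) =====
-- def _fuzzy_overlap(query_content: set, text_content: set) -> int:
--     """Count content overlap with simple prefix matching for plurals/variants."""
--     if not query_content or not text_content:
--         return 0
--     overlap = 0
--     for q in query_content:
--         if q in text_content:
--             overlap += 1
--             continue
--         if len(q) < 4:
--             continue
--         for t in text_content:
--             if len(t) < 4:
--                 continue
--             if t.startswith(q) or q.startswith(t):
--                 overlap += 1
--                 break
--     return overlap
-- ===== SOURCE B (Python) =====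
-- def _fuzzy_overlap(query_content: set, text_content: set) -> int:
--     """Count content overlap with simple prefix matching for plurals/variants."""
--     if not query_content or not text_content:
--         return 0
--     text_set = set(text_content)
--     long_text = set()
--     prefix_index = set()
--     for t in text_set:
--         if len(t) >= 4:
--             long_text.add(t)
--             for k in range(4, len(t) + 1):
--                 prefix_index.add(t[:k])
--     overlap = 0
--     for q in query_content:
--         if q in text_set:
--             overlap += 1
--         elif len(q) >= 4 and (q in prefix_index or
--                 any(q[:k] in long_text for k in range(4, len(q)))):
--             overlap += 1
--     return overlap
-- ===== Notes on version B (the rewrite author's own statement) =====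
-- stated objective: faster
-- what changed: B builds, in one pass over the text set, a hash-set index of every length->=4 prefix of the text words (plus the set of long text words), so each query word is answered by O(len(q)) set lookups instead of A's inner scan over the whole text set with two startswith tests per pair.
import Mathlib
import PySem

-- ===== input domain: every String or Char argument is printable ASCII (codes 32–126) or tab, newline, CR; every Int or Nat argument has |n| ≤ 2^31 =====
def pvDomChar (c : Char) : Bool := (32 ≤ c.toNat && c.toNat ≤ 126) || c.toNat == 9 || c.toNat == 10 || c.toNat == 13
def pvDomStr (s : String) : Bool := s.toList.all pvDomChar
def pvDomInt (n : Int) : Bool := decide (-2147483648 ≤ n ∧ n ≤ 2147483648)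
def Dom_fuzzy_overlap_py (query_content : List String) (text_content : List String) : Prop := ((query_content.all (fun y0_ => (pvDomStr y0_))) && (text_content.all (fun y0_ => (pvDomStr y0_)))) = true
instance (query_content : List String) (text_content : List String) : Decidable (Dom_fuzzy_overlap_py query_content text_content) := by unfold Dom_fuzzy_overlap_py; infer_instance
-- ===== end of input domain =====

-- B replaces A's per-query scan over the whole text set by a one-pass prefix index
-- (set of all length-≥4 prefixes of text words) queried per word.


-- ===== PORT A =====
-- the inner 'for t in text_content: …' loop with continue/break
def pvInnerA (q : String) : List String → Bool
  | [] => false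
  | t :: ts =>
    if PySem.Str.len t < 4 then pvInnerA q ts
    else if PySem.Str.startswith t q || PySem.Str.startswith q t then true
    else pvInnerA q ts

def fuzzy_overlap_py (query_content : List String) (text_content : List String) : Int :=
  if query_content.isEmpty || text_content.isEmpty then 0
  else
    query_content.foldl (fun overlap q =>
      if text_content.contains q then overlap + 1
      else if PySem.Str.len q < 4 then overlap
      else if pvInnerA q text_content then overlap + 1 else overlap) 0

-- ===== PORT B =====
-- 'for k in range(4, len(t)+1): prefix_index.add(t[:k])'
def pvAddPrefixes (acc : PySem.Set String) (t : String) : PySem.Set String :=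
  (PySem.List.pyRange 4 ((PySem.Str.len t : Int) + 1) 1).foldl
    (fun s k => PySem.Set.add s (PySem.Str.slice t none (some k))) acc

-- the build loop over text_set: returns (prefix_index, long_text)
def pvBuild (textSet : List String) : PySem.Set String × PySem.Set String :=
  textSet.foldl
    (fun (p : PySem.Set String × PySem.Set String) t =>
      if 4 ≤ PySem.Str.len t then (pvAddPrefixes p.1 t, PySem.Set.add p.2 t) else p)
    ([], [])

def fuzzy_overlap_py_alt (query_content : List String) (text_content : List String) : Int :=
  if query_content.isEmpty || text_content.isEmpty then 0
  else
    let textSet := PySem.Set.ofList text_content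
    let built := pvBuild textSet
    query_content.foldl (fun overlap q =>
      if PySem.Set.contains textSet q then overlap + 1
      else if 4 ≤ PySem.Str.len q &&
          (PySem.Set.contains built.1 q ||
            (PySem.List.pyRange 4 (PySem.Str.len q : Int) 1).any
              (fun k => PySem.Set.contains built.2 (PySem.Str.slice q none (some k))))
        then overlap + 1 else overlap) 0

-- ===== PRECONDITION & SPEC =====
def Spec_fuzzy_overlap_py (query_content : List String) (text_content : List String) (out : Int) : Prop := out = fuzzy_overlap_py_alt query_content text_content
instance (query_content : List String) (text_content : List String) (out : Int) : Decidable (Spec_fuzzy_overlap_py query_content text_content out) := by unfold Spec_fuzzy_overlap_py; infer_instance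

-- ===== CLAIM (what is proved, stated in full; the proofs are below) =====
def Claim_equal_fuzzy_overlap_py : Prop := ∀ (query_content : List String) (text_content : List String), Dom_fuzzy_overlap_py query_content text_content → Spec_fuzzy_overlap_py query_content text_content (fuzzy_overlap_py query_content text_content)

-- ===== LEMMAS AND PROOFS =====

theorem pvInnerA_iff (q : String) (T : List String) :
    pvInnerA q T = true ↔
      ∃ t ∈ T, 4 ≤ PySem.Str.len t ∧
        (PySem.Str.startswith t q = true ∨ PySem.Str.startswith q t = true) := by
  induction T with
  | nil => simp [pvInnerA]
  | cons t ts ih =>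
    simp only [pvInnerA]
    split_ifs with h1 h2
    · simp only [ih, List.mem_cons]
      constructor
      · rintro ⟨u, hu, h⟩; exact ⟨u, Or.inr hu, h⟩
      · rintro ⟨u, hu | hu, h⟩
        · subst hu; omega
        · exact ⟨u, hu, h⟩
    · simp only [true_iff]
      exact ⟨t, List.mem_cons_self .., by omega, by
        rcases Bool.or_eq_true_iff.mp h2 with h | h
        exacts [Or.inl h, Or.inr h]⟩
    · simp only [ih, List.mem_cons]
      constructor
      · rintro ⟨u, hu, h⟩; exact ⟨u, Or.inr hu, h⟩
      · rintro ⟨u, hu | hu, h⟩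
        · subst hu
          rcases h.2 with h' | h' <;>
            simp only [PySem.Str.startswith_eq] at h' <;> simp [h'] at h2
        · exact ⟨u, hu, h⟩

theorem pvAddPrefixes_mem (acc : PySem.Set String) (t x : String) :
    x ∈ pvAddPrefixes acc t ↔
      x ∈ acc ∨ ∃ k : Int, 4 ≤ k ∧ k < (PySem.Str.len t : Int) + 1 ∧
        x = PySem.Str.slice t none (some k) := by
  unfold pvAddPrefixes
  rw [PySem.Set.mem_foldl_add]
  simp only [PySem.List.mem_pyRange_one, and_assoc]

theorem pvBuildAux (S : List String) (p : PySem.Set String × PySem.Set String) (x : String) :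
    (x ∈ (S.foldl (fun (p : PySem.Set String × PySem.Set String) t =>
        if 4 ≤ PySem.Str.len t then (pvAddPrefixes p.1 t, PySem.Set.add p.2 t) else p) p).1 ↔
      x ∈ p.1 ∨ ∃ t ∈ S, 4 ≤ PySem.Str.len t ∧ ∃ k : Int, 4 ≤ k ∧ k ≤ (PySem.Str.len t : Int) ∧
        x = PySem.Str.slice t none (some k)) ∧
    (x ∈ (S.foldl (fun (p : PySem.Set String × PySem.Set String) t =>
        if 4 ≤ PySem.Str.len t then (pvAddPrefixes p.1 t, PySem.Set.add p.2 t) else p) p).2 ↔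
      x ∈ p.2 ∨ ∃ t ∈ S, 4 ≤ PySem.Str.len t ∧ x = t) := by
  induction S generalizing p with
  | nil => simp
  | cons t ts ih =>
    simp only [List.foldl_cons, List.mem_cons]
    obtain ⟨ih1, ih2⟩ := ih (if 4 ≤ PySem.Str.len t then (pvAddPrefixes p.1 t, PySem.Set.add p.2 t) else p)
    rw [ih1, ih2]
    split_ifs with h4
    · simp only [pvAddPrefixes_mem, PySem.Set.mem_add]
      constructor
      · constructor
        · rintro ((hp | ⟨k, h1, h2, h3⟩) | ⟨u, hu, h⟩)
          · exact Or.inl hp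
          · exact Or.inr ⟨t, Or.inl rfl, h4, k, h1, by omega, h3⟩
          · exact Or.inr ⟨u, Or.inr hu, h⟩
        · rintro (hp | ⟨u, (rfl | hu), h⟩)
          · exact Or.inl (Or.inl hp)
          · obtain ⟨_, k, h1, h2, h3⟩ := h
            exact Or.inl (Or.inr ⟨k, h1, by omega, h3⟩)
          · exact Or.inr ⟨u, hu, h⟩
      · constructor
        · rintro ((hp | rfl) | ⟨u, hu, h⟩)
          · exact Or.inl hp
          · exact Or.inr ⟨x, Or.inl rfl, h4, rfl⟩
          · exact Or.inr ⟨u, Or.inr hu, h⟩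
        · rintro (hp | ⟨u, (rfl | hu), h⟩)
          · exact Or.inl (Or.inl hp)
          · exact Or.inl (Or.inr h.2)
          · exact Or.inr ⟨u, hu, h⟩
    · constructor
      · constructor
        · rintro (hp | ⟨u, hu, h⟩)
          · exact Or.inl hp
          · exact Or.inr ⟨u, Or.inr hu, h⟩
        · rintro (hp | ⟨u, (rfl | hu), h⟩)
          · exact Or.inl hp
          · exact absurd h.1 h4
          · exact Or.inr ⟨u, hu, h⟩
      · constructor
        · rintro (hp | ⟨u, hu, h⟩)
          · exact Or.inl hp
          · exact Or.inr ⟨u, Or.inr hu, h⟩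
        · rintro (hp | ⟨u, (rfl | hu), h⟩)
          · exact Or.inl hp
          · exact absurd h.1 h4
          · exact Or.inr ⟨u, hu, h⟩

-- q[:k] (0 ≤ k) is take on code points
theorem pvSlice_toList (s : String) (k : Int) (hk : 0 ≤ k) :
    (PySem.Str.slice s none (some k)).toList = s.toList.take k.toNat := by
  simp [PySem.List.slice_to _ hk]

-- the per-query indicators of A and B coincide
theorem pvPerQ (q : String) (T : List String) (hq : q ∉ T) (hlen : 4 ≤ PySem.Str.len q) :
    (pvInnerA q T = true) ↔
      ((PySem.Set.contains (pvBuild (PySem.Set.ofList T)).1 q ||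
        (PySem.List.pyRange 4 (PySem.Str.len q : Int) 1).any
          (fun k => PySem.Set.contains (pvBuild (PySem.Set.ofList T)).2
            (PySem.Str.slice q none (some k)))) = true) := by
  rw [pvInnerA_iff]
  unfold pvBuild
  simp only [Bool.or_eq_true, List.any_eq_true, PySem.Set.contains_iff,
    (pvBuildAux _ _ _).1, (pvBuildAux _ _ _).2, PySem.Set.mem_ofList,
    PySem.List.mem_pyRange_one, List.not_mem_nil, false_or]
  simp only [PySem.Str.len_eq, PySem.Str.startswith_eq] at *
  constructor
  · rintro ⟨t, ht, h4, hs | hs⟩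
    · -- q is a prefix of t : q ∈ prefix_index
      have hpre := (PySem.Chars.startswith_iff _ _).mp hs
      refine Or.inl ⟨t, ht, h4, (q.toList.length : Int), by omega,
        by exact_mod_cast hpre.length_le, ?_⟩
      apply String.toList_inj.mp
      rw [pvSlice_toList _ _ (by positivity)]
      simpa using List.prefix_iff_eq_take.mp hpre
    · -- t is a proper prefix of q : q[:len(t)] ∈ long_text
      have hpre := (PySem.Chars.startswith_iff _ _).mp hs
      have hne : t ≠ q := fun h => hq (h ▸ ht)
      have hlt : t.toList.length < q.toList.length := by
        rcases Nat.lt_or_ge t.toList.length q.toList.length with h | h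
        · exact h
        · exact absurd (String.toList_inj.mp (hpre.eq_of_length_le h)) hne
      refine Or.inr ⟨(t.toList.length : Int), ⟨by omega, by exact_mod_cast hlt⟩, t, ht, h4, ?_⟩
      apply String.toList_inj.mp
      rw [pvSlice_toList _ _ (by positivity)]
      simpa using (List.prefix_iff_eq_take.mp hpre).symm
  · rintro (⟨t, ht, h4, k, hk1, hk2, hx⟩ | ⟨k, ⟨hk1, hk2⟩, t, ht, h4, hx⟩)
    · -- q = t[:k] : t startswith q
      refine ⟨t, ht, h4, Or.inl ?_⟩
      apply (PySem.Chars.startswith_iff _ _).mpr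
      have := congrArg String.toList hx
      rw [pvSlice_toList _ _ (by omega)] at this
      rw [this]; exact List.take_prefix _ _
    · -- q[:k] = t : q startswith t
      refine ⟨t, ht, h4, Or.inr ?_⟩
      apply (PySem.Chars.startswith_iff _ _).mpr
      have := congrArg String.toList hx
      rw [pvSlice_toList _ _ (by omega)] at this
      rw [← this]; exact List.take_prefix _ _

-- ===== VERDICT (by name: the statement is the Claim_ definition above) =====
theorem fuzzy_overlap_py_spec : Claim_equal_fuzzy_overlap_py := by
  intro Q T _
  unfold Spec_fuzzy_overlap_py fuzzy_overlap_py fuzzy_overlap_py_alt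
  split_ifs with h
  · rfl
  · apply List.foldl_ext
    intro acc q _
    by_cases hq : q ∈ T
    · simp [hq, PySem.Set.mem_ofList]
    · have hc1 : T.contains q = false := by simpa [List.contains_iff_mem] using hq
      have hc2 : PySem.Set.contains (PySem.Set.ofList T) q = false := by
        simpa [PySem.Set.contains_iff, PySem.Set.mem_ofList] using hq
      rw [hc1, hc2]
      simp only [Bool.false_eq_true, if_false]
      by_cases hl : PySem.Str.len q < 4
      · rw [if_pos hl]
        refine (if_neg ?_).symm
        simp only [Bool.and_eq_true, decide_eq_true_eq]
        exact fun hcontra => absurd hcontra.1 (by omega)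
      · have h4 : 4 ≤ PySem.Str.len q := by omega
        rw [if_neg hl]
        simp only [decide_eq_true h4, Bool.true_and]
        by_cases hA : pvInnerA q T = true
        · rw [if_pos hA, if_pos ((pvPerQ q T hq h4).mp hA)]
        · rw [if_neg hA, if_neg (fun hB => hA ((pvPerQ q T hq h4).mpr hB))]
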